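-- pv_equiv track=rewrite | github.com/parmentelat/flotbioinfo | modules/w4_s09_c1_needleman_wunsh_iter.py | phase1
-- ===== SOURCE A (Python) =====
-- def insertion_cost(base):
--     return 1
--
-- def substitution_cost(base1, base2):
--     return 1 if base1 != base2 else 0
--
-- def init_costs(len1, len2):
--     """
--     Initialise un tableau de len1 + 1 listes
--     de chacune len2 + 1 éléments
--     initialisés à 0
--     """
--     return [ [ 0 for j in range(len2 + 1)] for i in range(len1 + 1)]
--
-- def phase1(adn1, adn2):
--     """
--     Première phase de Needleman et Wunsch itératif
--     Élabore itérativement le tableau des coûts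
--       par un parcours en diagonale
--     On obtient un tableau de taille
--       [len(adn1) + 1] x [len(adn2) + 1]
--     Renvoie le tableau en valeur
--     """
--     # initialisations
--     len1 = len(adn1)
--     len2 = len(adn2)
--     # le tableau est initialisé à zéro
--     costs = init_costs(len1, len2)
--
--     # le parcours en diagonale - cf ci-dessus
--     for c in range(len1 + len2 + 1):
--         for i in range(c + 1):
--             # on déduit j de c et i
--             j = c - i
--             # on ne considère que ceux qui tombent dans le rectangle
--             if 0 <= i <= len1 and 0 <= j <= len2:
--                 if j == 0:     # sur un bord : insertion
--                     costs[i][j] = sum(insertion_cost(base) for base in adn1[:i])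
--                 elif i == 0:   # l'autre bord : insertion
--                     costs[i][j] = sum(insertion_cost(base) for base in adn2[:j])
--                 else:          # au milieu
--                     costs[i][j] = min(
--                         # substitution
--                         costs[i-1][j-1] + substitution_cost(adn1[i-1], adn2[j-1]),
--                         # insertion
--                         costs[i][j-1] + insertion_cost(adn2[j-1]),
--                        # insertion
--                         costs[i-1][j] + insertion_cost(adn1[i-1]))
--     # on renvoie le résultat
--     return costs
-- ===== SOURCE B (Python) =====
-- def phase1(adn1, adn2):
--     """Row-by-row Needleman-Wunsch fill: O(len1*len2) instead of the
--     diagonal sweep's O((len1+len2)^2) cell visits; borders are i and j."""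
--     len2 = len(adn2)
--     prev = list(range(len2 + 1))
--     rows = [prev]
--     for i, c1 in enumerate(adn1, 1):
--         cur = [i]
--         for j, c2 in enumerate(adn2, 1):
--             cur.append(min(prev[j - 1] + (1 if c1 != c2 else 0),
--                            cur[-1] + 1,
--                            prev[j] + 1))
--         rows.append(cur)
--         prev = cur
--     return rows
-- ===== Notes on version B (the rewrite author's own statement) =====
-- stated objective: alternative
-- what changed: Replaces the diagonal sweep over all (i, c-i) candidates of every diagonal (with a per-border-cell re-summation of insertion costs) by a direct row-by-row DP fill that visits each of the (len1+1)*(len2+1) cells exactly once with borders written as i and j directly.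
import Mathlib
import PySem

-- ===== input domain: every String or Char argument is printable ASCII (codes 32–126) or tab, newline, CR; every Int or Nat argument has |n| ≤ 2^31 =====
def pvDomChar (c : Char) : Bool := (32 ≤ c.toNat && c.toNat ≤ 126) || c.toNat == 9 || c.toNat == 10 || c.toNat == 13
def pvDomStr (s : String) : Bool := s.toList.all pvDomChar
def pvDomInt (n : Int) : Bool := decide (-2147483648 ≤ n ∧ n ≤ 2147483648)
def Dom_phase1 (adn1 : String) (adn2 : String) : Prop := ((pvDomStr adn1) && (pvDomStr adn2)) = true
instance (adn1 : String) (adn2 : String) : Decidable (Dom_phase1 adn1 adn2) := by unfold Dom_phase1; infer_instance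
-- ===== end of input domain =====

-- B replaces A's diagonal sweep (which examines every (i,c-i) candidate of every diagonal and
-- re-sums insertion costs on the borders) by a row-by-row DP fill touching each cell once
-- (an alternative traversal of the same cost table).

-- ===== PORT A =====
def insertionCost (_base : Char) : Int := 1

def substitutionCost (base1 base2 : Char) : Int := if base1 ≠ base2 then 1 else 0

def initCosts (len1 len2 : Nat) : List (List Int) :=
  (List.range (len1 + 1)).map (fun _ => (List.range (len2 + 1)).map (fun _ => (0 : Int)))

-- costs[i][j] = v  (List.set on the outer list and on the row, as in Python)
def setCell (t : List (List Int)) (i j : Nat) (v : Int) : List (List Int) :=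
  t.set i ((t.getD i []).set j v)

-- costs[i][j] read; indices are always in range where A reads, so getD is exact
def get2 (t : List (List Int)) (i j : Nat) : Int := (t.getD i []).getD j 0

-- body of A's inner loop 'for i in range(c+1)'
def innerBody (l1 l2 : List Char) (c : Nat) (costs : List (List Int)) (i : Nat) : List (List Int) :=
  let j := c - i
  if i ≤ l1.length ∧ j ≤ l2.length then
    if j = 0 then
      setCell costs i j (((l1.take i).map insertionCost).sum)
    else if i = 0 then
      setCell costs i j (((l2.take j).map insertionCost).sum)
    else
      setCell costs i j (min (min
        (get2 costs (i-1) (j-1) + substitutionCost (l1.getD (i-1) 'A') (l2.getD (j-1) 'A'))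
        (get2 costs i (j-1) + insertionCost (l2.getD (j-1) 'A')))
        (get2 costs (i-1) j + insertionCost (l1.getD (i-1) 'A')))
  else costs

-- body of A's outer loop 'for c in range(len1+len2+1)'
def outerBody (l1 l2 : List Char) (costs : List (List Int)) (c : Nat) : List (List Int) :=
  (List.range (c + 1)).foldl (innerBody l1 l2 c) costs

def phase1 (adn1 : String) (adn2 : String) : List (List Int) :=
  (List.range (adn1.toList.length + adn2.toList.length + 1)).foldl
    (outerBody adn1.toList adn2.toList) (initCosts adn1.toList.length adn2.toList.length)

-- ===== PORT B =====
-- body of B's inner loop 'for j, c2 in enumerate(adn2, 1)'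
def altInnerBody (prev : List Int) (c1 : Char) (cur : List Int) (q : Char × Nat) : List Int :=
  let c2 := q.1
  let j := q.2
  cur ++ [min (min (prev.getD (j - 1) 0 + (if c1 ≠ c2 then 1 else 0))
                   (cur.getLastD 0 + 1))
              (prev.getD j 0 + 1)]

def altRow (l2 : List Char) (prev : List Int) (c1 : Char) (i : Nat) : List Int :=
  (l2.zipIdx 1).foldl (altInnerBody prev c1) [(i : Int)]

-- body of B's outer loop 'for i, c1 in enumerate(adn1, 1)'
def altOuterBody (l2 : List Char) (st : List Int × List (List Int)) (p : Char × Nat) :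
    List Int × List (List Int) :=
  let cur := altRow l2 st.1 p.1 p.2
  (cur, st.2 ++ [cur])

def prev0 (l2 : List Char) : List Int := (List.range (l2.length + 1)).map Int.ofNat

def phase1_alt (adn1 : String) (adn2 : String) : List (List Int) :=
  ((adn1.toList.zipIdx 1).foldl (altOuterBody adn2.toList)
    (prev0 adn2.toList, [prev0 adn2.toList])).2

-- ===== PRECONDITION & SPEC =====
def Spec_phase1 (adn1 : String) (adn2 : String) (out : List (List Int)) : Prop := out = phase1_alt adn1 adn2
instance (adn1 : String) (adn2 : String) (out : List (List Int)) : Decidable (Spec_phase1 adn1 adn2 out) := by unfold Spec_phase1; infer_instance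

-- ===== CLAIM (what is proved, stated in full; the proofs are below) =====
def Claim_equal_phase1 : Prop := ∀ (adn1 : String) (adn2 : String), Dom_phase1 adn1 adn2 → Spec_phase1 adn1 adn2 (phase1 adn1 adn2)

-- ===== LEMMAS AND PROOFS =====

-- the mathematical cost table both programs compute
def cell (l1 l2 : List Char) : Nat → Nat → Int
  | i, j =>
    if j = 0 then (i : Int)
    else if i = 0 then (j : Int)
    else min (min (cell l1 l2 (i-1) (j-1) + substitutionCost (l1.getD (i-1) 'A') (l2.getD (j-1) 'A'))
                  (cell l1 l2 i (j-1) + 1))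
             (cell l1 l2 (i-1) j + 1)
termination_by i j => i + j
decreasing_by all_goals omega

def rowOf (l1 l2 : List Char) (i : Nat) : List Int :=
  (List.range (l2.length + 1)).map (fun j => cell l1 l2 i j)

def table (l1 l2 : List Char) : List (List Int) :=
  (List.range (l1.length + 1)).map (rowOf l1 l2)

theorem cell_j0 (l1 l2 : List Char) (i : Nat) : cell l1 l2 i 0 = (i : Int) := by
  rw [cell]; simp

theorem cell_i0 (l1 l2 : List Char) (j : Nat) : cell l1 l2 0 j = (j : Int) := by
  rw [cell]; split_ifs with h <;> simp_all

theorem cell_mid (l1 l2 : List Char) (i j : Nat) (hi : i ≠ 0) (hj : j ≠ 0) :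
    cell l1 l2 i j =
      min (min (cell l1 l2 (i-1) (j-1) + substitutionCost (l1.getD (i-1) 'A') (l2.getD (j-1) 'A'))
               (cell l1 l2 i (j-1) + 1))
          (cell l1 l2 (i-1) j + 1) := by
  rw [cell]; simp [hi, hj]

theorem getD_range_map (g : Nat → Int) (n k : Nat) (h : k < n) :
    ((List.range n).map g).getD k 0 = g k := by
  simp [List.getD, h]

theorem getLastD_range_map (g : Nat → Int) (n : Nat) :
    ((List.range (n + 1)).map g).getLastD 0 = g n := by
  simp [List.range_succ]

-- ---- B equals the table ----
theorem alt_inner (l1 l2 : List Char) (i : Nat) (hi : i ≠ 0) :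
    ∀ (suf : List Char) (m : Nat) (cur : List Int), suf = l2.drop m → m ≤ l2.length →
      cur = (List.range (m + 1)).map (fun j => cell l1 l2 i j) →
      (suf.zipIdx (m + 1)).foldl
          (altInnerBody ((List.range (l2.length + 1)).map (fun j => cell l1 l2 (i-1) j)) (l1.getD (i-1) 'A'))
          cur
        = rowOf l1 l2 i := by
  intro suf
  induction suf with
  | nil =>
    intro m cur hsuf hm hcur
    have hlen := congrArg List.length hsuf
    simp at hlen
    have hme : m = l2.length := by omega
    subst hme
    simpa [rowOf] using hcur
  | cons a rest ih =>
    intro m cur hsuf hm hcur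
    have hm' : m < l2.length := by
      by_contra hc
      rw [List.drop_eq_nil_of_le (by omega)] at hsuf
      exact List.cons_ne_nil a rest hsuf
    have hdrop := List.drop_eq_getElem_cons hm'
    rw [hdrop] at hsuf
    have ha : a = l2[m] := (List.cons.injEq _ _ _ _ ▸ hsuf).1
    have hrest : rest = l2.drop (m + 1) := (List.cons.injEq _ _ _ _ ▸ hsuf).2
    rw [List.zipIdx_cons, List.foldl_cons]
    refine ih (m + 1) _ hrest (by omega) ?_
    unfold altInnerBody
    simp only [hcur]
    rw [getD_range_map _ _ ((m+1) - 1) (by omega), getD_range_map _ _ (m+1) (by omega),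
        getLastD_range_map]
    have hsub : (if l1.getD (i-1) 'A' ≠ a then (1:Int) else 0)
        = substitutionCost (l1.getD (i-1) 'A') (l2.getD ((m+1)-1) 'A') := by
      simp [substitutionCost, ha, Nat.add_sub_cancel, List.getD, List.getElem?_eq_getElem hm']
    rw [hsub]
    rw [show (List.range (m + 1 + 1)) = List.range (m + 1) ++ [m + 1] from List.range_succ]
    rw [List.map_append]
    congr 1
    simp only [List.map_cons, List.map_nil, Nat.add_sub_cancel]
    rw [cell_mid l1 l2 i (m + 1) hi (by omega)]
    simp

theorem alt_outer (l1 l2 : List Char) :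
    ∀ (suf : List Char) (m : Nat) (st : List Int × List (List Int)), suf = l1.drop m → m ≤ l1.length →
      st.1 = rowOf l1 l2 m → st.2 = (List.range (m + 1)).map (rowOf l1 l2) →
      ((suf.zipIdx (m + 1)).foldl (altOuterBody l2) st).2 = table l1 l2 := by
  intro suf
  induction suf with
  | nil =>
    intro m st hsuf hm h1 h2
    have hlen := congrArg List.length hsuf
    simp at hlen
    have hme : m = l1.length := by omega
    subst hme
    simpa [table] using h2
  | cons a rest ih =>
    intro m st hsuf hm h1 h2
    have hm' : m < l1.length := by
      by_contra hc
      rw [List.drop_eq_nil_of_le (by omega)] at hsuf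
      exact List.cons_ne_nil a rest hsuf
    have hdrop := List.drop_eq_getElem_cons hm'
    rw [hdrop] at hsuf
    have ha : a = l1[m] := (List.cons.injEq _ _ _ _ ▸ hsuf).1
    have hrest : rest = l1.drop (m + 1) := (List.cons.injEq _ _ _ _ ▸ hsuf).2
    rw [List.zipIdx_cons, List.foldl_cons]
    have hcur : altRow l2 st.1 a (m + 1) = rowOf l1 l2 (m + 1) := by
      unfold altRow
      have hc1 : a = l1.getD ((m+1)-1) 'A' := by
        rw [ha]
        simp [List.getD, List.getElem?_eq_getElem hm']
      rw [hc1, h1]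
      have hprev : rowOf l1 l2 m
          = (List.range (l2.length + 1)).map (fun j => cell l1 l2 ((m+1)-1) j) := by
        simp [rowOf]
      rw [hprev]
      refine alt_inner l1 l2 (m + 1) (by omega) l2 0 _ (by simp) (by omega) ?_
      simp [cell_j0]
    refine ih (m + 1) _ hrest (by omega) ?_ ?_
    · simp [altOuterBody, hcur]
    · simp only [altOuterBody, h2, hcur]
      rw [show (List.range (m + 1 + 1)) = List.range (m + 1) ++ [m + 1] from List.range_succ]
      simp

theorem phase1_alt_eq (adn1 adn2 : String) :
    phase1_alt adn1 adn2 = table adn1.toList adn2.toList := by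
  unfold phase1_alt
  have hp : prev0 adn2.toList = rowOf adn1.toList adn2.toList 0 := by
    unfold prev0 rowOf
    exact List.map_congr_left (fun j _ => (cell_i0 adn1.toList adn2.toList j).symm)
  
  refine alt_outer adn1.toList adn2.toList adn1.toList 0 _ (by simp) (by omega) hp ?_
  simp [hp]

-- ---- A equals the table ----
def Sh (t : List (List Int)) (n1 n2 : Nat) : Prop :=
  t.length = n1 + 1 ∧ ∀ r ∈ t, r.length = n2 + 1

def InvA (l1 l2 : List Char) (c k : Nat) (t : List (List Int)) : Prop :=
  Sh t l1.length l2.length ∧ ∀ i j, i ≤ l1.length → j ≤ l2.length →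
    get2 t i j = if i + j < c ∨ (i + j = c ∧ i < k) then cell l1 l2 i j else 0

theorem get2_set_ne (t : List (List Int)) (i j v i' j' : _) (h : ¬(i' = i ∧ j' = j)) :
    get2 (setCell t i j v) i' j' = get2 t i' j' := by
  unfold get2 setCell List.getD
  by_cases hii : i' = i
  · subst hii
    have hj : ¬ j' = j := fun hj => h ⟨rfl, hj⟩
    by_cases hlt : i' < t.length
    · rw [List.getElem?_set_self (by omega)]
      simp [List.getElem?_eq_getElem hlt, List.getElem?_set_ne (fun hh => hj hh.symm)]
    · rw [List.set_eq_of_length_le (by omega)]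
  · rw [List.getElem?_set_ne (fun hh => hii hh.symm)]

theorem get2_set_self (t : List (List Int)) (i j : Nat) (v : Int)
    (hi : i < t.length) (hj : j < (t.getD i []).length) :
    get2 (setCell t i j v) i j = v := by
  unfold get2 setCell List.getD
  rw [List.getElem?_set_self hi]
  simp
  rw [List.getElem?_set_self (by simpa [List.getD, List.getElem?_eq_getElem hi] using hj)]
  simp

theorem sh_setCell (t : List (List Int)) (n1 n2 i j : Nat) (v : Int) (h : Sh t n1 n2) :
    Sh (setCell t i j v) n1 n2 := by
  obtain ⟨h1, h2⟩ := h
  refine ⟨by simp [setCell, h1], ?_⟩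
  intro r hr
  by_cases hi : i < t.length
  · rcases List.mem_or_eq_of_mem_set hr with hm | hm
    · exact h2 r hm
    · subst hm
      simp [List.getD, List.getElem?_eq_getElem hi]
      exact h2 _ (List.getElem_mem _)
  · rw [setCell, List.set_eq_of_length_le (by omega)] at hr
    exact h2 r hr

theorem sum_insertion (l : List Char) : (l.map insertionCost).sum = (l.length : Int) := by
  induction l with
  | nil => simp
  | cons a l ih => simp [insertionCost, ih]; push_cast; ring

theorem get2_init (n1 n2 i j : Nat) : get2 (initCosts n1 n2) i j = 0 := by
  unfold get2 List.getD
  rcases h : (initCosts n1 n2)[i]? with _ | r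
  · simp
  · have hr : r ∈ initCosts n1 n2 := List.mem_of_getElem? h
    simp only [Option.getD_some]
    rcases h2 : r[j]? with _ | x
    · simp
    · have hx : x ∈ r := List.mem_of_getElem? h2
      unfold initCosts at hr
      obtain ⟨a, -, ha⟩ := List.mem_map.mp hr
      rw [← ha] at hx
      simp at hx
      simp [hx]

theorem sh_init (n1 n2 : Nat) : Sh (initCosts n1 n2) n1 n2 := by
  refine ⟨by simp [initCosts], ?_⟩
  intro r hr
  unfold initCosts at hr
  obtain ⟨a, -, ha⟩ := List.mem_map.mp hr
  simp [← ha]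

theorem innerBody_inv (l1 l2 : List Char) (c k : Nat) (t : List (List Int))
    (hk : k ≤ c) (h : InvA l1 l2 c k t) : InvA l1 l2 c (k + 1) (innerBody l1 l2 c t k) := by
  obtain ⟨hsh, hval⟩ := h
  have hlen := hsh.1
  unfold innerBody
  by_cases hg : k ≤ l1.length ∧ c - k ≤ l2.length
  · have hkt : k < t.length := by omega
    have hrow : (t.getD k []).length = l2.length + 1 := by
      have hgk : t.getD k [] = t[k] := by simp [List.getD, List.getElem?_eq_getElem hkt]
      rw [hgk]
      exact hsh.2 _ (List.getElem_mem _)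
    have hkey : ∀ v, v = cell l1 l2 k (c - k) → InvA l1 l2 c (k + 1) (setCell t k (c - k) v) := by
      intro v hv
      refine ⟨sh_setCell _ _ _ _ _ _ hsh, ?_⟩
      intro i j hi hj
      by_cases he : i = k ∧ j = c - k
      · obtain ⟨he1, he2⟩ := he
        subst he1; subst he2
        rw [get2_set_self t _ _ v hkt (by omega), hv, if_pos (Or.inr ⟨by omega, by omega⟩)]
      · rw [get2_set_ne t _ _ v _ _ he, hval i j hi hj]
        have hne : i ≠ k ∨ j ≠ c - k := by tauto
        split_ifs with h1 h2 <;> first | rfl | (exfalso; omega)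
    rw [if_pos hg]
    by_cases hj0 : c - k = 0
    · rw [if_pos hj0]
      apply hkey
      have hs : ((l1.take k).map insertionCost).sum = (k : Int) := by
        rw [sum_insertion]
        simp
        omega
      rw [hs, hj0, cell_j0]
    · rw [if_neg hj0]
      by_cases hk0 : k = 0
      · rw [if_pos hk0]
        apply hkey
        have hs : ((l2.take (c - k)).map insertionCost).sum = ((c - k : Nat) : Int) := by
          rw [sum_insertion]
          simp
          omega
        rw [hs, hk0, cell_i0]
      · rw [if_neg hk0]
        apply hkey
        have e1 : get2 t (k-1) ((c-k)-1) = cell l1 l2 (k-1) ((c-k)-1) := by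
          rw [hval _ _ (by omega) (by omega), if_pos (Or.inl (by omega))]
        have e2 : get2 t k ((c-k)-1) = cell l1 l2 k ((c-k)-1) := by
          rw [hval _ _ (by omega) (by omega), if_pos (Or.inl (by omega))]
        have e3 : get2 t (k-1) (c-k) = cell l1 l2 (k-1) (c-k) := by
          rw [hval _ _ (by omega) (by omega), if_pos (Or.inl (by omega))]
        rw [e1, e2, e3, cell_mid l1 l2 k (c - k) hk0 hj0]
        simp [insertionCost]
  · rw [if_neg hg]
    refine ⟨hsh, ?_⟩
    intro i j hi hj
    rw [hval i j hi hj]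
    split_ifs with h1 h2 <;> first | rfl | (exfalso; omega)

theorem inner_fold_aux (l1 l2 : List Char) (c : Nat) (t : List (List Int))
    (h : InvA l1 l2 c 0 t) :
    ∀ n, n ≤ c + 1 → InvA l1 l2 c n ((List.range n).foldl (innerBody l1 l2 c) t) := by
  intro n
  induction n with
  | zero => intro _; simpa using h
  | succ n ih =>
    intro hn
    rw [List.range_succ, List.foldl_append, List.foldl_cons, List.foldl_nil]
    exact innerBody_inv l1 l2 c n _ (by omega) (ih (by omega))

theorem outer_fold_inv (l1 l2 : List Char) (n : Nat) :
    InvA l1 l2 n 0 ((List.range n).foldl (outerBody l1 l2) (initCosts l1.length l2.length)) := by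
  induction n with
  | zero =>
    simp only [List.range_zero, List.foldl_nil]
    refine ⟨sh_init _ _, ?_⟩
    intro i j hi hj
    rw [get2_init, if_neg (by omega)]
  | succ n ih =>
    rw [List.range_succ, List.foldl_append, List.foldl_cons, List.foldl_nil]
    have h2 := inner_fold_aux l1 l2 n _ ih (n + 1) le_rfl
    refine ⟨h2.1, ?_⟩
    intro i j hi hj
    rw [show outerBody l1 l2 ((List.range n).foldl (outerBody l1 l2) (initCosts l1.length l2.length)) n
          = (List.range (n + 1)).foldl (innerBody l1 l2 n)
              ((List.range n).foldl (outerBody l1 l2) (initCosts l1.length l2.length)) from rfl] at *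
    rw [h2.2 i j hi hj]
    split_ifs with h1 h2 <;> first | rfl | (exfalso; omega)

theorem phase1_eq (adn1 adn2 : String) :
    phase1 adn1 adn2 = table adn1.toList adn2.toList := by
  unfold phase1
  have h := outer_fold_inv adn1.toList adn2.toList (adn1.toList.length + adn2.toList.length + 1)
  set t := List.foldl (outerBody adn1.toList adn2.toList)
      (initCosts adn1.toList.length adn2.toList.length)
      (List.range (adn1.toList.length + adn2.toList.length + 1)) with ht
  obtain ⟨⟨hL, hR⟩, hval⟩ := h
  apply List.ext_getElem
  · rw [hL]; simp [table]
  · intro i h1 h2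
    have hi' : i ≤ adn1.toList.length := by omega
    have hrowlen : (t[i]'h1).length = adn2.toList.length + 1 := hR _ (List.getElem_mem h1)
    rw [show (table adn1.toList adn2.toList)[i]'h2 = rowOf adn1.toList adn2.toList i from by
      simp [table]]
    apply List.ext_getElem
    · rw [hrowlen]; simp [rowOf]
    · intro j hj1 hj2
      have hj' : j ≤ adn2.toList.length := by omega
      have hg : (t[i]'h1)[j]'hj1 = get2 t i j := by
        simp [get2, List.getD, List.getElem?_eq_getElem h1, List.getElem?_eq_getElem hj1]
      rw [hg, hval i j hi' hj', if_pos (by omega)]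
      simp [rowOf]

-- ===== VERDICT (by name: the statement is the Claim_ definition above) =====
theorem phase1_spec : Claim_equal_phase1 := by
  intro adn1 adn2 _
  unfold Spec_phase1
  rw [phase1_eq, phase1_alt_eq]
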